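-- pv_equiv track=rewrite | github.com/mariamturner/Online_Learning_Algs | hw2other.py | extract_features_dev_or_test
-- ===== SOURCE A (Python) =====
-- def extract_features_dev_or_test(data, features):
--     """
--     Extracts feature dictionaries and labels from "data". The only
--     features which should be computed are those in "features". You
--     should add your additional featurization code here.
--
--     TODO: You should add your additional featurization code here.
--     """
--     y = []
--     X = []
--     for sentence in data:
--         padded = sentence[:]
--         padded.insert(0, ('SSS', None))
--         padded.insert(0, ('SSS', None))
--         padded.insert(0, ('SSS', None))
--         padded.append(('EEE', None))
--         padded.append(('EEE', None))
--         padded.append(('EEE', None))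
--         for i in range(3, len(padded) - 3):
--             y.append(1 if padded[i][1] == 'I' else -1)
--             feat1 = 'w-1=' + str(padded[i - 1][0])
--             feat2 = 'w+1=' + str(padded[i + 1][0])
--             feat3 = 'w-2=' + str(padded[i - 2][0])
--             feat4 = 'w+2=' + str(padded[i + 2][0])
--             feat5 = 'w-3=' + str(padded[i - 3][0])
--             feat6 = 'w+3=' + str(padded[i + 3][0])
--             feat7 = 'w-1&w-2=' + str(padded[i - 1][0]) + ' ' + str(padded[i - 2][0])
--             feat8 = 'w+1&w+2=' + str(padded[i + 1][0]) + ' ' + str(padded[i + 2][0])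
--             feat9 = 'w-1&w+1=' + str(padded[i - 1][0]) + ' ' + str(padded[i + 1][0])
--             feats = [feat1, feat2, feat3, feat4, feat5, feat6, feat7, feat8, feat9]
--             feats = {feature: 1 for feature in feats if feature in features}
--             X.append(feats)
--     return X, y
-- ===== SOURCE B (Python) =====
-- def extract_features_dev_or_test(data, features):
--     """Streaming pass: right contexts from zipping three shifted copies of the
--     word list, left contexts from three rolling variables; no padded buffer,
--     no index arithmetic."""
--     X = []
--     y = []
--     for sentence in data:
--         words = [str(w) for (w, _) in sentence]
--         rights = zip(words[1:] + ['EEE'],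
--                      words[2:] + ['EEE', 'EEE'],
--                      words[3:] + ['EEE', 'EEE', 'EEE'])
--         l3, l2, l1 = 'SSS', 'SSS', 'SSS'
--         for ((w, tag), (r1, r2, r3)) in zip(sentence, rights):
--             y.append(1 if tag == 'I' else -1)
--             feats = ['w-1=' + l1, 'w+1=' + r1, 'w-2=' + l2, 'w+2=' + r2,
--                      'w-3=' + l3, 'w+3=' + r3,
--                      'w-1&w-2=' + l1 + ' ' + l2,
--                      'w+1&w+2=' + r1 + ' ' + r2,
--                      'w-1&w+1=' + l1 + ' ' + r1]
--             X.append({f: 1 for f in feats if f in features})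
--             l3, l2, l1 = l2, l1, str(w)
--     return X, y
-- ===== Notes on version B (the rewrite author's own statement) =====
-- stated objective: alternative
-- what changed: B replaces A's padded buffer with random-access index lookups (six sentinel tuples inserted, then padded[i+/-j] for each token) by a single streaming pass: right contexts come from zipping three shifted copies of the word list and left contexts from three rolling variables updated each step, so there is no padding and no index arithmetic.
import Mathlib
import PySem

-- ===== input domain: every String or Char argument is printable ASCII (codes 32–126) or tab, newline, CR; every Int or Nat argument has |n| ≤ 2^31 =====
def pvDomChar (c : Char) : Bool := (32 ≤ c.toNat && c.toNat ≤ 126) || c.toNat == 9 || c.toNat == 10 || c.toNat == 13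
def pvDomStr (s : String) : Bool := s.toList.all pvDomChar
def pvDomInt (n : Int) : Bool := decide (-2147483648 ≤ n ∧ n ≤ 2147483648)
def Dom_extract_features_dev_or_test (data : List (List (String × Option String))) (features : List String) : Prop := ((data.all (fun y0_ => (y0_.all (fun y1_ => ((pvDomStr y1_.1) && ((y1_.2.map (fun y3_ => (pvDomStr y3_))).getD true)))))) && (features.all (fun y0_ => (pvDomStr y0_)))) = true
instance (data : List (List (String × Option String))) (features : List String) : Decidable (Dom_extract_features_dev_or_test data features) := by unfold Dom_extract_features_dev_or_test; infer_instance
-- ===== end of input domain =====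

-- B replaces A's padded buffer + random-access index lookups by one streaming pass
-- (zipped shifted word lists for right contexts, rolling variables for left contexts);
-- same outputs, objective: alternative decomposition.

-- ===== PORT A =====
-- padded = sentence[:] with three ('SSS', None) inserted at the front and three ('EEE', None) appended
def padA (s : List (String × Option String)) : List (String × Option String) :=
  [("SSS", none), ("SSS", none), ("SSS", none)] ++ (s ++ [("EEE", none), ("EEE", none), ("EEE", none)])

-- the body of A's inner loop (one token, at padded index i)
def aStepTok (features : List String) (padded : List (String × Option String))
    (acc : (List (List (String × Int))) × List Int) (i : Int) :
    (List (List (String × Int))) × List Int :=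
  let yv : Int := if (PySem.List.pyGetD padded i ("", none)).2 == some "I" then 1 else -1
  let feat1 := "w-1=" ++ (PySem.List.pyGetD padded (i - 1) ("", none)).1
  let feat2 := "w+1=" ++ (PySem.List.pyGetD padded (i + 1) ("", none)).1
  let feat3 := "w-2=" ++ (PySem.List.pyGetD padded (i - 2) ("", none)).1
  let feat4 := "w+2=" ++ (PySem.List.pyGetD padded (i + 2) ("", none)).1
  let feat5 := "w-3=" ++ (PySem.List.pyGetD padded (i - 3) ("", none)).1
  let feat6 := "w+3=" ++ (PySem.List.pyGetD padded (i + 3) ("", none)).1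
  let feat7 := "w-1&w-2=" ++ (PySem.List.pyGetD padded (i - 1) ("", none)).1 ++ " " ++ (PySem.List.pyGetD padded (i - 2) ("", none)).1
  let feat8 := "w+1&w+2=" ++ (PySem.List.pyGetD padded (i + 1) ("", none)).1 ++ " " ++ (PySem.List.pyGetD padded (i + 2) ("", none)).1
  let feat9 := "w-1&w+1=" ++ (PySem.List.pyGetD padded (i - 1) ("", none)).1 ++ " " ++ (PySem.List.pyGetD padded (i + 1) ("", none)).1
  let feats := [feat1, feat2, feat3, feat4, feat5, feat6, feat7, feat8, feat9]
  let fdict := (feats.foldl (fun d f => if features.contains f then d.insert f 1 else d)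
      (PySem.Dict.empty : PySem.Dict String Int)).items
  (acc.1 ++ [fdict], acc.2 ++ [yv])

def extract_features_dev_or_test (data : List (List (String × Option String))) (features : List String) : (List (List (String × Int))) × List Int :=
  data.foldl (fun acc sentence =>
    let padded := padA sentence
    (PySem.List.pyRange 3 ((padded.length : Int) - 3) 1).foldl (aStepTok features padded) acc)
    ([], [])

-- ===== PORT B =====
-- rights = zip(words[1:]+['EEE'], words[2:]+['EEE','EEE'], words[3:]+['EEE','EEE','EEE'])
def bRights (words : List String) : List (String × String × String) :=
  (words.drop 1 ++ ["EEE"]).zip ((words.drop 2 ++ ["EEE", "EEE"]).zip (words.drop 3 ++ ["EEE", "EEE", "EEE"]))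

-- B's inner loop over zip(sentence, rights), carrying the rolling left context (l3, l2, l1)
def bScan (features : List String)
    (ps : List ((String × Option String) × (String × String × String)))
    (l3 l2 l1 : String)
    (acc : (List (List (String × Int))) × List Int) : (List (List (String × Int))) × List Int :=
  match ps with
  | [] => acc
  | ((w, tag), (r1, r2, r3)) :: rest =>
    let yv : Int := if tag == some "I" then 1 else -1
    let feats := ["w-1=" ++ l1, "w+1=" ++ r1, "w-2=" ++ l2, "w+2=" ++ r2,
                  "w-3=" ++ l3, "w+3=" ++ r3,
                  "w-1&w-2=" ++ l1 ++ " " ++ l2,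
                  "w+1&w+2=" ++ r1 ++ " " ++ r2,
                  "w-1&w+1=" ++ l1 ++ " " ++ r1]
    let fdict := (feats.foldl (fun d f => if features.contains f then d.insert f 1 else d)
        (PySem.Dict.empty : PySem.Dict String Int)).items
    bScan features rest l2 l1 w (acc.1 ++ [fdict], acc.2 ++ [yv])

def extract_features_dev_or_test_alt (data : List (List (String × Option String))) (features : List String) : (List (List (String × Int))) × List Int :=
  data.foldl (fun acc sentence =>
    let words := sentence.map (fun t => t.1)
    bScan features (sentence.zip (bRights words)) "SSS" "SSS" "SSS" acc)
    ([], [])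

-- ===== PRECONDITION & SPEC =====
def Spec_extract_features_dev_or_test (data : List (List (String × Option String))) (features : List String) (out : (List (List (String × Int))) × List Int) : Prop := out = extract_features_dev_or_test_alt data features
instance (data : List (List (String × Option String))) (features : List String) (out : (List (List (String × Int))) × List Int) : Decidable (Spec_extract_features_dev_or_test data features out) := by unfold Spec_extract_features_dev_or_test; infer_instance

-- ===== CLAIM (what is proved, stated in full; the proofs are below) =====
def Claim_equal_extract_features_dev_or_test : Prop := ∀ (data : List (List (String × Option String))) (features : List String), Dom_extract_features_dev_or_test data features → Spec_extract_features_dev_or_test data features (extract_features_dev_or_test data features)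

-- ===== LEMMAS AND PROOFS =====

-- the word at absolute index j of s, with SSS/EEE outside (proof-only reference function)
def refWord (s : List (String × Option String)) (j : Int) : String :=
  if j < 0 then "SSS"
  else if (s.length : Int) ≤ j then "EEE"
  else (PySem.List.pyGetD s j ("", none)).1

-- the common index-based description of one token's contribution
def refTok (features : List String) (s : List (String × Option String))
    (acc : (List (List (String × Int))) × List Int) (k : Nat) :
    (List (List (String × Int))) × List Int :=
  let yv : Int := if (PySem.List.pyGetD s (k : Int) ("", none)).2 == some "I" then 1 else -1
  let feats := ["w-1=" ++ refWord s ((k : Int) - 1), "w+1=" ++ refWord s ((k : Int) + 1),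
                "w-2=" ++ refWord s ((k : Int) - 2), "w+2=" ++ refWord s ((k : Int) + 2),
                "w-3=" ++ refWord s ((k : Int) - 3), "w+3=" ++ refWord s ((k : Int) + 3),
                "w-1&w-2=" ++ refWord s ((k : Int) - 1) ++ " " ++ refWord s ((k : Int) - 2),
                "w+1&w+2=" ++ refWord s ((k : Int) + 1) ++ " " ++ refWord s ((k : Int) + 2),
                "w-1&w+1=" ++ refWord s ((k : Int) - 1) ++ " " ++ refWord s ((k : Int) + 1)]
  let fdict := (feats.foldl (fun d f => if features.contains f then d.insert f 1 else d)
      (PySem.Dict.empty : PySem.Dict String Int)).items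
  (acc.1 ++ [fdict], acc.2 ++ [yv])

theorem padA_length (s : List (String × Option String)) : (padA s).length = s.length + 6 := by
  simp [padA]

-- padded[j+3] equals sentence[j] for in-range j
theorem pad_get (s : List (String × Option String)) (j : Int) (h0 : 0 ≤ j)
    (h1 : j < (s.length : Int)) :
    PySem.List.pyGetD (padA s) (j + 3) ("", none) = PySem.List.pyGetD s j ("", none) := by
  rw [PySem.List.pyGetD_eq_getElem (padA s) ("", none) (by omega) (by rw [padA_length]; push_cast; omega),
      PySem.List.pyGetD_eq_getElem s ("", none) h0 h1]
  have hm : (j + 3).toNat = j.toNat + 3 := by omega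
  simp only [padA, hm, List.getElem_append, List.length_cons, List.length_nil]
  split_ifs with hA hB
  · exact absurd hA (by omega)
  · congr 1
  · exact absurd h1 (by omega)

-- the first component of padded[j+3] is refWord at j
theorem pad_word (s : List (String × Option String)) (j : Int) (h1 : -3 ≤ j)
    (h2 : j < (s.length : Int) + 3) :
    (PySem.List.pyGetD (padA s) (j + 3) ("", none)).1 = refWord s j := by
  by_cases hc1 : j < 0
  · rw [PySem.List.pyGetD_eq_getElem (padA s) ("", none) (by omega) (by rw [padA_length]; push_cast; omega)]
    rw [refWord, if_pos hc1]
    have hm : (j + 3).toNat = 0 ∨ (j + 3).toNat = 1 ∨ (j + 3).toNat = 2 := by omega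
    rcases hm with h | h | h <;> simp [padA, h]
  · by_cases hc2 : (s.length : Int) ≤ j
    · rw [PySem.List.pyGetD_eq_getElem (padA s) ("", none) (by omega) (by rw [padA_length]; push_cast; omega)]
      rw [refWord, if_neg hc1, if_pos hc2]
      simp only [padA, List.getElem_append, List.length_cons, List.length_nil]
      split_ifs with hA hB
      · omega
      · omega
      · have ht : (j + 3).toNat - 3 - s.length = 0 ∨ (j + 3).toNat - 3 - s.length = 1 ∨
            (j + 3).toNat - 3 - s.length = 2 := by omega
        rcases ht with h | h | h <;> simp [h]
    · rw [pad_get s j (by omega) (by omega)]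
      rw [refWord, if_neg hc1, if_neg hc2]

-- one token of A equals the index-based description
theorem tok_eq (features : List String) (s : List (String × Option String))
    (acc : (List (List (String × Int))) × List Int) (k : Nat) (hk : k < s.length) :
    aStepTok features (padA s) acc (3 + (k : Int)) = refTok features s acc k := by
  have hn : (0:Int) ≤ (k:Int) ∧ (k:Int) < (s.length : Int) := by
    constructor <;> omega
  have e0 : (3:Int) + (k:Int) = (k:Int) + 3 := by ring
  have em1 : (3:Int) + (k:Int) - 1 = ((k:Int) - 1) + 3 := by ring
  have ep1 : (3:Int) + (k:Int) + 1 = ((k:Int) + 1) + 3 := by ring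
  have em2 : (3:Int) + (k:Int) - 2 = ((k:Int) - 2) + 3 := by ring
  have ep2 : (3:Int) + (k:Int) + 2 = ((k:Int) + 2) + 3 := by ring
  have em3 : (3:Int) + (k:Int) - 3 = ((k:Int) - 3) + 3 := by ring
  have ep3 : (3:Int) + (k:Int) + 3 = ((k:Int) + 3) + 3 := by ring
  simp only [aStepTok, refTok]
  rw [em1, ep1, em2, ep2, em3, ep3, e0,
    pad_word s ((k : Int) - 1) (by omega) (by omega),
    pad_word s ((k : Int) + 1) (by omega) (by omega),
    pad_word s ((k : Int) - 2) (by omega) (by omega),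
    pad_word s ((k : Int) + 2) (by omega) (by omega),
    pad_word s ((k : Int) - 3) (by omega) (by omega),
    pad_word s ((k : Int) + 3) (by omega) (by omega),
    pad_get s (k : Int) hn.1 hn.2]

-- one sentence of A equals the index-based fold
theorem a_sentence_eq (features : List String) (s : List (String × Option String))
    (acc : (List (List (String × Int))) × List Int) :
    (PySem.List.pyRange 3 (((padA s).length : Int) - 3) 1).foldl (aStepTok features (padA s)) acc
      = (List.range s.length).foldl (refTok features s) acc := by
  have hl : ((padA s).length : Int) - 3 = (s.length : Int) + 3 := by
    rw [padA_length]; push_cast; ring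
  rw [hl, PySem.List.pyRange_one 3 ((s.length : Int) + 3)]
  have h1 : ((s.length : Int) + 3 - 3).toNat = s.length := by omega
  rw [h1, List.foldl_map]
  apply List.foldl_ext
  intro a k hkmem
  exact tok_eq features s a k (List.mem_range.mp hkmem)

-- a shifted word list ++ its EEE pad, read at k < n, is the word at k + j (EEE past the end)
theorem shift_get (words : List String) (j k : Nat) (pads : List String)
    (hlen : pads.length = j) (hpads : ∀ (i : Nat) (h : i < pads.length), pads[i] = "EEE")
    (hk : k < words.length) :
    (words.drop j ++ pads)[k]'(by simp [hlen]; omega) =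
      if h : k + j < words.length then words[k + j] else "EEE" := by
  rw [List.getElem_append]
  split_ifs with h1 h2 h2
  · rw [List.getElem_drop]; congr 1; omega
  · exact absurd h2 (by simp at h1; omega)
  · exact absurd h1 (by simp; omega)
  · exact hpads _ (by simp at h1 ⊢; omega)

theorem zs_length (s : List (String × Option String)) :
    (s.zip (bRights (s.map (fun t => t.1)))).length = s.length := by
  simp only [List.length_zip, bRights, List.length_append, List.length_drop, List.length_map,
    List.length_cons, List.length_nil]
  omega

-- refWord at a nonnegative in-range index is the word there
theorem refWord_in (s : List (String × Option String)) (k : Nat) (hk : k < s.length) :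
    refWord s (k : Int) = (s[k]).1 := by
  rw [refWord, if_neg (by omega), if_neg (by omega),
      PySem.List.pyGetD_eq_getElem s ("", none) (by omega) (by omega)]
  simp

-- one unfolding step of bScan (kept in unreduced foldl shape)
theorem bScan_cons (features : List String) (w : String) (tag : Option String)
    (r1 r2 r3 l3 l2 l1 : String)
    (rest : List ((String × Option String) × (String × String × String)))
    (acc : (List (List (String × Int))) × List Int) :
    bScan features (((w, tag), (r1, r2, r3)) :: rest) l3 l2 l1 acc =
      bScan features rest l2 l1 w
        (acc.1 ++ [(["w-1=" ++ l1, "w+1=" ++ r1, "w-2=" ++ l2, "w+2=" ++ r2,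
                     "w-3=" ++ l3, "w+3=" ++ r3,
                     "w-1&w-2=" ++ l1 ++ " " ++ l2,
                     "w+1&w+2=" ++ r1 ++ " " ++ r2,
                     "w-1&w+1=" ++ l1 ++ " " ++ r1].foldl
            (fun d f => if features.contains f then d.insert f 1 else d)
            (PySem.Dict.empty : PySem.Dict String Int)).items],
         acc.2 ++ [if tag == some "I" then 1 else -1]) := rfl

-- B's scan from position k computes the index-based fold over k..n
theorem bScan_spec (features : List String) (s : List (String × Option String)) :
    ∀ (m k : Nat) (acc : (List (List (String × Int))) × List Int), k + m = s.length →
    bScan features ((s.zip (bRights (s.map (fun t => t.1)))).drop k)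
        (refWord s ((k : Int) - 3)) (refWord s ((k : Int) - 2)) (refWord s ((k : Int) - 1)) acc
      = (List.range' k m).foldl (refTok features s) acc := by
  intro m
  induction m with
  | zero =>
    intro k acc hk
    rw [List.drop_of_length_le (by rw [zs_length]; omega)]
    simp [bScan]
  | succ m ih =>
    intro k acc hk
    have hkn : k < s.length := by omega
    have hkz : k < (s.zip (bRights (s.map (fun t => t.1)))).length := by rw [zs_length]; omega
    rw [List.drop_eq_getElem_cons hkz]
    have hget : (s.zip (bRights (s.map (fun t => t.1))))[k] =
        (s[k], (refWord s ((k:Int) + 1), refWord s ((k:Int) + 2), refWord s ((k:Int) + 3))) := by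
      rw [List.getElem_zip]
      congr 1
      have hw : (s.map (fun t => t.1)).length = s.length := by simp
      simp only [bRights]
      rw [List.getElem_zip, List.getElem_zip]
      have g1 := shift_get (s.map (fun t => t.1)) 1 k ["EEE"] rfl (by intro i h; simp only [List.length_cons, List.length_nil] at h; interval_cases i <;> rfl) (by omega)
      have g2 := shift_get (s.map (fun t => t.1)) 2 k ["EEE", "EEE"] rfl (by intro i h; simp only [List.length_cons, List.length_nil] at h; interval_cases i <;> rfl) (by omega)
      have g3 := shift_get (s.map (fun t => t.1)) 3 k ["EEE", "EEE", "EEE"] rfl (by intro i h; simp only [List.length_cons, List.length_nil] at h; interval_cases i <;> rfl) (by omega)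
      refine Prod.ext ?_ (Prod.ext ?_ ?_)
      all_goals simp only []
      · rw [g1]; split_ifs with h
        · rw [List.getElem_map]
          rw [show ((k:Int) + 1) = ((k + 1 : Nat) : Int) by push_cast; ring,
              refWord_in s (k+1) (by simp at h; omega)]
        · rw [refWord, if_neg (by omega), if_pos (by simp at h; push_cast; omega)]
      · rw [g2]; split_ifs with h
        · rw [List.getElem_map]
          rw [show ((k:Int) + 2) = ((k + 2 : Nat) : Int) by push_cast; ring,
              refWord_in s (k+2) (by simp at h; omega)]
        · rw [refWord, if_neg (by omega), if_pos (by simp at h; push_cast; omega)]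
      · rw [g3]; split_ifs with h
        · rw [List.getElem_map]
          rw [show ((k:Int) + 3) = ((k + 3 : Nat) : Int) by push_cast; ring,
              refWord_in s (k+3) (by simp at h; omega)]
        · rw [refWord, if_neg (by omega), if_pos (by simp at h; push_cast; omega)]
    rw [hget, bScan_cons]
    have hy : (if (s[k]).2 == some "I" then (1:Int) else -1)
        = (if (PySem.List.pyGetD s (k : Int) ("", none)).2 == some "I" then (1:Int) else -1) := by
      rw [PySem.List.pyGetD_eq_getElem s ("", none) (by omega) (by omega)]
      simp
    have hstep : (acc.1 ++ [(["w-1=" ++ refWord s ((k:Int) - 1), "w+1=" ++ refWord s ((k:Int) + 1),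
             "w-2=" ++ refWord s ((k:Int) - 2), "w+2=" ++ refWord s ((k:Int) + 2),
             "w-3=" ++ refWord s ((k:Int) - 3), "w+3=" ++ refWord s ((k:Int) + 3),
             "w-1&w-2=" ++ refWord s ((k:Int) - 1) ++ " " ++ refWord s ((k:Int) - 2),
             "w+1&w+2=" ++ refWord s ((k:Int) + 1) ++ " " ++ refWord s ((k:Int) + 2),
             "w-1&w+1=" ++ refWord s ((k:Int) - 1) ++ " " ++ refWord s ((k:Int) + 1)].foldl
            (fun d f => if features.contains f then d.insert f 1 else d)
            (PySem.Dict.empty : PySem.Dict String Int)).items],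
          acc.2 ++ [if (s[k]).2 == some "I" then (1:Int) else -1]) = refTok features s acc k := by
      rw [refTok]
      simp only [hy]
    rw [hstep, List.range'_succ, List.foldl_cons]
    have hrec := ih (k + 1) (refTok features s acc k) (by omega)
    have e1 : ((k + 1 : Nat) : Int) - 3 = (k : Int) - 2 := by push_cast; ring
    have e2 : ((k + 1 : Nat) : Int) - 2 = (k : Int) - 1 := by push_cast; ring
    have e3 : ((k + 1 : Nat) : Int) - 1 = (k : Int) := by push_cast; ring
    rw [e1, e2, e3, refWord_in s k hkn] at hrec
    exact hrec

-- one sentence of B equals the index-based fold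
theorem b_sentence_eq (features : List String) (s : List (String × Option String))
    (acc : (List (List (String × Int))) × List Int) :
    bScan features (s.zip (bRights (s.map (fun t => t.1)))) "SSS" "SSS" "SSS" acc
      = (List.range s.length).foldl (refTok features s) acc := by
  have h := bScan_spec features s s.length 0 acc (by omega)
  simp only [List.drop_zero] at h
  rw [show ((0:Nat) : Int) - 3 = -3 from by ring, show ((0:Nat) : Int) - 2 = -2 from by ring,
      show ((0:Nat) : Int) - 1 = -1 from by ring] at h
  simp only [refWord, if_pos (by omega : (-3:Int) < 0), if_pos (by omega : (-2:Int) < 0),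
      if_pos (by omega : (-1:Int) < 0)] at h
  rw [h, List.range_eq_range']

-- ===== VERDICT (by name: the statement is the Claim_ definition above) =====
theorem extract_features_dev_or_test_spec : Claim_equal_extract_features_dev_or_test := by
  intro data features _
  unfold Spec_extract_features_dev_or_test extract_features_dev_or_test extract_features_dev_or_test_alt
  apply List.foldl_ext
  intro acc sentence _
  rw [a_sentence_eq features sentence acc]
  exact (b_sentence_eq features sentence acc).symm
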